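-- pv_equiv track=rewrite | github.com/OmShrivastava19/Omnibimol | backend/services/chemprot.py | _first_snippet
-- ===== SOURCE A (Python) =====
-- from typing import Any, Callable, Iterable, Optional, Protocol
--
-- def _first_snippet(sentences: Iterable[str], chemical: str, protein: str) -> str:
--     chemical_lower = chemical.lower()
--     protein_lower = protein.lower()
--     fallback = ""
--     for sentence in sentences:
--         sentence_lower = sentence.lower()
--         if chemical_lower in sentence_lower and protein_lower in sentence_lower:
--             return sentence
--         if not fallback and (chemical_lower in sentence_lower or protein_lower in sentence_lower):
--             fallback = sentence
--     return fallback
-- ===== SOURCE B (Python) =====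
-- def _first_snippet(sentences, chemical, protein):
--     sentences = list(sentences)
--     c = chemical.lower()
--     p = protein.lower()
--     for s in sentences:
--         low = s.lower()
--         if c in low and p in low:
--             return s
--     for s in sentences:
--         if s and (c in s.lower() or p in s.lower()):
--             return s
--     return ""
-- ===== Notes on version B (the rewrite author's own statement) =====
-- stated objective: simpler
-- what changed: Replaces the single loop with a mutable fallback accumulator by two plain passes: first return the sentence containing both terms, otherwise return the first non-empty sentence containing either term.
import Mathlib
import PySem

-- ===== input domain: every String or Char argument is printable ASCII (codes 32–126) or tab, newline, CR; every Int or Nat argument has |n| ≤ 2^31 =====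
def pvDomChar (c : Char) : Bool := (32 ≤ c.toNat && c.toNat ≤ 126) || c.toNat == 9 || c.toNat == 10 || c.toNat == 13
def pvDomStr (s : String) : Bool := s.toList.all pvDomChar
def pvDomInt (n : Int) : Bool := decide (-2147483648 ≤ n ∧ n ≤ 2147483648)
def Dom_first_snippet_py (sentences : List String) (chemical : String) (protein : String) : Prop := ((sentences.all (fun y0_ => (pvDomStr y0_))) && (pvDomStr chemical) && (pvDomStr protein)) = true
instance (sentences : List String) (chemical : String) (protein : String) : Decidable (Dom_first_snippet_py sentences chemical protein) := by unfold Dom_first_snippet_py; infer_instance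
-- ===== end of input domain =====

-- B replaces A's single loop with a mutable fallback by two plain passes (first sentence with both terms, else first non-empty sentence with either); simpler decomposition, same cost.
-- ===== PORT A =====
-- literal port of A: one loop carrying a 'fallback' string updated when empty
def firstSnippetLoopA (cl pl : String) (fallback : String) : List String → String
  | [] => fallback
  | sentence :: rest =>
    let sl := PySem.Str.lower sentence
    if PySem.Str.isIn cl sl && PySem.Str.isIn pl sl then sentence
    else
      firstSnippetLoopA cl pl
        (if fallback == "" && (PySem.Str.isIn cl sl || PySem.Str.isIn pl sl) then sentence
         else fallback) rest

def first_snippet_py (sentences : List String) (chemical : String) (protein : String) : String :=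
  firstSnippetLoopA (PySem.Str.lower chemical) (PySem.Str.lower protein) "" sentences

-- ===== PORT B =====
-- B: two passes — first sentence containing both terms, else first non-empty sentence containing either
def first_snippet_py_alt (sentences : List String) (chemical : String) (protein : String) : String :=
  let c := PySem.Str.lower chemical
  let p := PySem.Str.lower protein
  match sentences.find? (fun s =>
      let low := PySem.Str.lower s
      PySem.Str.isIn c low && PySem.Str.isIn p low) with
  | some s => s
  | none =>
    match sentences.find? (fun s =>
        s != "" && (PySem.Str.isIn c (PySem.Str.lower s) || PySem.Str.isIn p (PySem.Str.lower s))) with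
    | some s => s
    | none => ""

-- ===== PRECONDITION & SPEC =====
def Spec_first_snippet_py (sentences : List String) (chemical : String) (protein : String) (out : String) : Prop := out = first_snippet_py_alt sentences chemical protein
instance (sentences : List String) (chemical : String) (protein : String) (out : String) : Decidable (Spec_first_snippet_py sentences chemical protein out) := by unfold Spec_first_snippet_py; infer_instance

-- ===== CLAIM (what is proved, stated in full; the proofs are below) =====
def Claim_equal_first_snippet_py : Prop := ∀ (sentences : List String) (chemical : String) (protein : String), Dom_first_snippet_py sentences chemical protein → Spec_first_snippet_py sentences chemical protein (first_snippet_py sentences chemical protein)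

-- ===== LEMMAS AND PROOFS =====
-- invariant of A's loop: either term-matching sentence wins; otherwise a non-empty fallback
-- is kept, and an empty fallback is the first non-empty either-matching sentence
theorem firstSnippetLoopA_characterization (cl pl : String) (l : List String) :
    ∀ fb, firstSnippetLoopA cl pl fb l =
      match l.find? (fun s =>
          let low := PySem.Str.lower s
          PySem.Str.isIn cl low && PySem.Str.isIn pl low) with
      | some s => s
      | none =>
        if fb == "" then
          match l.find? (fun s =>
              s != "" && (PySem.Str.isIn cl (PySem.Str.lower s) || PySem.Str.isIn pl (PySem.Str.lower s))) with
          | some s => s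
          | none => ""
        else fb := by
  induction l with
  | nil =>
    intro fb
    by_cases hfb : fb = "" <;> simp_all [firstSnippetLoopA, List.find?]
  | cons s rest ih =>
    intro fb
    simp only [firstSnippetLoopA, List.find?]
    rw [ih]
    simp only [bne]
    cases h1 : PySem.Str.isIn cl (PySem.Str.lower s) <;>
      cases h2 : PySem.Str.isIn pl (PySem.Str.lower s) <;>
        cases hfb : fb == "" <;>
          cases hs : s == "" <;>
            simp [h1, h2, hfb, hs]

-- ===== VERDICT (by name: the statement is the Claim_ definition above) =====
theorem first_snippet_py_spec : Claim_equal_first_snippet_py := by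
  intro sentences chemical protein _
  unfold Spec_first_snippet_py first_snippet_py first_snippet_py_alt
  rw [firstSnippetLoopA_characterization]
  simp
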